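-- pv_equiv track=rewrite | github.com/g16rim/Algorithm | 백준/Silver/17829. 222－풀링/222－풀링.py | f
-- ===== SOURCE A (Python) =====
-- def f(n, mat):
--     if n == 2:
--         li = []
--         for i in range(2):
--             for j in range(2):
--                 li.append(mat[i][j])
--         li.sort()
--         return li[2]
--     else:
--         temp = [[] for _ in range(n//2)]
--         for i in range(0, n, 2):
--             for j in range(0, n, 2):
--                 li = [mat[i][j], mat[i][j+1], mat[i+1][j], mat[i+1][j+1]]
--                 li.sort()
--                 temp[i//2].append(li[2])
--         return f(n//2, temp)
-- ===== SOURCE B (Python) =====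
-- def f(n, mat):
--     # top-down divide-and-conquer on index regions: no intermediate matrices are built
--     def g(size, r, c):
--         if size == 2:
--             return sorted([mat[r][c], mat[r][c+1], mat[r+1][c], mat[r+1][c+1]])[2]
--         h = size // 2
--         return sorted([g(h, r, c), g(h, r, c + h), g(h, r + h, c), g(h, r + h, c + h)])[2]
--     return g(n, 0, 0)
-- ===== Notes on version B (the rewrite author's own statement) =====
-- stated objective: alternative
-- what changed: Replaces A's bottom-up per-level reduction, which materialises a new half-size matrix at every level and recurses on it, with a top-down divide-and-conquer recursion over (size,row,col) index regions of the original matrix that builds no intermediate matrices.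
import Mathlib
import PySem

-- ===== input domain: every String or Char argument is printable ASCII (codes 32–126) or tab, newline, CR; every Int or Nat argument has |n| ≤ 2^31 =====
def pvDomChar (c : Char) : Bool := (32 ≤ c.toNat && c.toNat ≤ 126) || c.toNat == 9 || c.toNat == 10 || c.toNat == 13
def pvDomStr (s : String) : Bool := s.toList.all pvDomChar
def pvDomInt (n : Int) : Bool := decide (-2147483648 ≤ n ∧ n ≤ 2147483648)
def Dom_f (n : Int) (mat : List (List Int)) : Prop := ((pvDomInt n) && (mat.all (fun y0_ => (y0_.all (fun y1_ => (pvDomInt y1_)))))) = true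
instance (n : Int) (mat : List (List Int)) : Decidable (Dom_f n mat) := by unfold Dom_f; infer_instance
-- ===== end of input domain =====

-- B replaces A's bottom-up per-level reduction (building a half-size matrix each level)
-- by a top-down divide-and-conquer recursion over (size,row,col) regions of the original
-- matrix; same asymptotic cost, no intermediate matrices (objective: alternative).


-- ===== PORT A =====
-- 'li = [mat[i][j], mat[i][j+1], mat[i+1][j], mat[i+1][j+1]]; li.sort(); li[2]' — the
-- third-smallest of the 2x2 block at (i,j); A's base case is this loop (range(2)×range(2),
-- appending in the same order) at (0,0), its pooling step is this at each (i,j).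
def pvCell (mat : List (List Int)) (i j : Int) : Int :=
  PySem.List.pyGetD (PySem.List.pyGetD mat i []) j 0

def pvBlock (mat : List (List Int)) (i j : Int) : Int :=
  PySem.List.pyGetD
    (PySem.List.sorted
      [pvCell mat i j, pvCell mat i (j + 1), pvCell mat (i + 1) j, pvCell mat (i + 1) (j + 1)]
      (fun x => x)) 2 0

-- used by f's termination proof (cited in decreasing_by)
theorem pv_floordiv_lt (n : Int) (h1 : ¬ n ≤ 1) (h2 : ¬ n = 2) :
    (PySem.Int.floordiv n 2).toNat < n.toNat := by
  rw [PySem.Int.floordiv_eq_ediv_of_pos (by omega)]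
  omega

def f (n : Int) (mat : List (List Int)) : Int :=
  if h1 : n ≤ 1 then 0   -- totality guard: the Python diverges for n ≤ 1 (n//2 never reaches 2); outside Pre_f
  else if h2 : n = 2 then pvBlock mat 0 0
  else
    let temp :=
      (PySem.List.pyRange 0 n 2).foldl (fun t i =>
        (PySem.List.pyRange 0 n 2).foldl (fun t j =>
          t.modify (PySem.Int.floordiv i 2).toNat (fun row => row ++ [pvBlock mat i j])) t)
        (List.replicate (PySem.Int.floordiv n 2).toNat [])
    f (PySem.Int.floordiv n 2) temp
termination_by n.toNat
decreasing_by exact pv_floordiv_lt n h1 h2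

-- ===== PORT B =====
def pvPool (mat : List (List Int)) (size r c : Int) : Int :=
  if h1 : size ≤ 1 then 0   -- totality guard: the Python diverges for size ≤ 1; outside Pre_f
  else if h2 : size = 2 then pvBlock mat r c
  else
    let h := PySem.Int.floordiv size 2
    PySem.List.pyGetD
      (PySem.List.sorted
        [pvPool mat h r c, pvPool mat h r (c + h),
         pvPool mat h (r + h) c, pvPool mat h (r + h) (c + h)] (fun x => x)) 2 0
termination_by size.toNat
decreasing_by all_goals exact pv_floordiv_lt size h1 h2

def f_alt (n : Int) (mat : List (List Int)) : Int := pvPool mat n 0 0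

-- ===== PRECONDITION & SPEC =====
-- Pre_f is exactly where the Python A returns: n must be a power of two ≥ 2 (otherwise the
-- recursion raises IndexError or never terminates) and the first n rows of mat must exist
-- and have length ≥ n (otherwise mat[i][j] raises IndexError).
def Pre_f (n : Int) (mat : List (List Int)) : Prop :=
  2 ≤ n ∧ n.toNat = 2 ^ Nat.log2 n.toNat ∧ n.toNat ≤ mat.length ∧
    ∀ row ∈ mat.take n.toNat, n.toNat ≤ row.length
instance (n : Int) (mat : List (List Int)) : Decidable (Pre_f n mat) := by
  unfold Pre_f; infer_instance

def pvWitness_f : Int × List (List Int) := (2, [[4, 1], [3, 2]])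

def Spec_f (n : Int) (mat : List (List Int)) (out : Int) : Prop := out = f_alt n mat
instance (n : Int) (mat : List (List Int)) (out : Int) : Decidable (Spec_f n mat out) := by
  unfold Spec_f; infer_instance

-- ===== CLAIM (what is proved, stated in full; the proofs are below) =====
def Claim_equal_f : Prop :=
  ∀ (n : Int) (mat : List (List Int)), Dom_f n mat → Pre_f n mat → Spec_f n mat (f n mat)

-- ===== LEMMAS AND PROOFS =====

-- the matrix A's pooling loop builds, written as an explicit table
def pvT (mat : List (List Int)) (m : Nat) : List (List Int) :=
  List.map (fun r : Nat =>
    List.map (fun c : Nat => pvBlock mat (2 * (r : Int)) (2 * (c : Int))) (List.range m))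
    (List.range m)

theorem pv_modify_append {α : Type} (A : List α) (x : α) (rest : List α) (g : α → α) :
    (A ++ x :: rest).modify A.length g = A ++ g x :: rest := by
  induction A with
  | nil => simp [List.modify]
  | cons a A ih => simpa [List.modify] using ih

theorem pv_inner (cs : List Nat) (g : Nat → Int) :
    ∀ (t : List (List Int)) (r : Nat),
      cs.foldl (fun t c => t.modify r (fun row => row ++ [g c])) t
        = t.modify r (fun row => row ++ cs.map g) := by
  induction cs with
  | nil =>
    intro t r
    have h : (fun row : List Int => row ++ List.map g []) = id := by
      funext row; simp
    rw [List.foldl_nil, h, List.modify_id]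
  | cons c cs ih =>
    intro t r
    simp only [List.foldl_cons, List.map_cons, ih]
    rw [List.modify_modify_eq]
    congr 1
    funext row
    simp

theorem pv_outer (B : Nat → Nat → Int) (m : Nat) :
    ∀ (k : Nat) (A : List (List Int)),
      (List.range' A.length k).foldl
          (fun t r => (List.range m).foldl (fun t c => t.modify r (fun row => row ++ [B r c])) t)
          (A ++ List.replicate k [])
        = A ++ (List.range' A.length k).map (fun r => (List.range m).map (fun c => B r c)) := by
  intro k
  induction k with
  | zero => intro A; simp
  | succ k ih =>
    intro A
    rw [List.range'_succ, List.replicate_succ, List.foldl_cons, List.map_cons]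
    rw [pv_inner]
    rw [pv_modify_append]
    have h1 : A.length + 1 = (A ++ [(List.range m).map (fun c => B A.length c)]).length := by
      simp
    calc (List.range' (A.length + 1) k).foldl
          (fun t r => (List.range m).foldl (fun t c => t.modify r (fun row => row ++ [B r c])) t)
          (A ++ (List.range m).map (fun c => B A.length c) :: List.replicate k [])
        = (List.range' (A ++ [(List.range m).map (fun c => B A.length c)]).length k).foldl
          (fun t r => (List.range m).foldl (fun t c => t.modify r (fun row => row ++ [B r c])) t)
          ((A ++ [(List.range m).map (fun c => B A.length c)]) ++ List.replicate k []) := by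
          rw [← h1]; simp
      _ = _ := by rw [ih]; simp

-- range(0, 2m, 2) enumerates the doubled indices
theorem pv_pyRange_two (m : Nat) :
    PySem.List.pyRange 0 (2 * (m : Int)) 2 = List.map (fun k : Nat => 2 * (k : Int)) (List.range m) := by
  rw [PySem.List.pyRange_of_pos 0 (2 * (m : Int)) (by omega)]
  rcases Nat.eq_zero_or_pos m with h | h
  · subst h; simp
  · have hlt : (0 : Int) < 2 * (m : Int) := by omega
    rw [if_pos hlt]
    have : ((2 * (m : Int) - 0 + 2 - 1) / 2).toNat = m := by omega
    rw [this]
    exact List.map_congr_left (fun k _ => by ring)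

theorem pv_floordiv_two_mul_toNat (r : Nat) :
    (PySem.Int.floordiv (2 * (r : Int)) 2).toNat = r := by
  rw [PySem.Int.floordiv_eq_ediv_of_pos (by omega)]
  omega

-- A's pooling loop computes exactly the table pvT
theorem pv_loop_eq_pvT (mat : List (List Int)) (m : Nat) :
    (PySem.List.pyRange 0 (2 * (m : Int)) 2).foldl (fun t i =>
        (PySem.List.pyRange 0 (2 * (m : Int)) 2).foldl (fun t j =>
          t.modify (PySem.Int.floordiv i 2).toNat (fun row => row ++ [pvBlock mat i j])) t)
        (List.replicate m [])
      = pvT mat m := by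
  rw [pv_pyRange_two, List.foldl_map]
  have hstep : (fun (t : List (List Int)) (r : Nat) =>
      (List.map (fun k : Nat => 2 * (k : Int)) (List.range m)).foldl (fun t j =>
        t.modify (PySem.Int.floordiv (2 * (r : Int)) 2).toNat
          (fun row => row ++ [pvBlock mat (2 * (r : Int)) j])) t)
      = (fun (t : List (List Int)) (r : Nat) =>
        (List.range m).foldl (fun t c =>
          t.modify r (fun row => row ++ [pvBlock mat (2 * (r : Int)) (2 * (c : Int))])) t) := by
    funext t r
    rw [List.foldl_map]
    simp only [pv_floordiv_two_mul_toNat]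
  rw [hstep]
  have := pv_outer (fun r c => pvBlock mat (2 * (r : Int)) (2 * (c : Int))) m m ([] : List (List Int))
  simpa [pvT, List.range_eq_range'] using this

theorem pv_cell_pvT (mat : List (List Int)) (m : Nat) (x y : Int)
    (hx0 : 0 ≤ x) (hx : x < m) (hy0 : 0 ≤ y) (hy : y < m) :
    pvCell (pvT mat m) x y = pvBlock mat (2 * x) (2 * y) := by
  unfold pvCell pvT
  have hlen : (List.map (fun r : Nat =>
      List.map (fun c : Nat => pvBlock mat (2 * (r : Int)) (2 * (c : Int))) (List.range m))
      (List.range m)).length = m := by simp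
  have hx' : x < (List.map (fun r : Nat =>
      List.map (fun c : Nat => pvBlock mat (2 * (r : Int)) (2 * (c : Int))) (List.range m))
      (List.range m)).length := by rw [hlen]; exact_mod_cast hx
  rw [PySem.List.pyGetD_eq_getElem _ _ hx0 hx']
  rw [List.getElem_map, List.getElem_range]
  have hlen2 : (List.map (fun c : Nat => pvBlock mat (2 * ((x.toNat : Nat) : Int)) (2 * (c : Int)))
      (List.range m)).length = m := by simp
  have hy' : y < (List.map (fun c : Nat => pvBlock mat (2 * ((x.toNat : Nat) : Int)) (2 * (c : Int)))
      (List.range m)).length := by rw [hlen2]; exact_mod_cast hy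
  rw [PySem.List.pyGetD_eq_getElem _ _ hy0 hy']
  rw [List.getElem_map, List.getElem_range]
  congr 1 <;> omega

theorem pv_pow_floordiv (j : Nat) :
    PySem.Int.floordiv ((2 : Int) ^ (j + 1)) 2 = (2 : Int) ^ j := by
  rw [PySem.Int.floordiv_eq_ediv_of_pos (by omega), pow_succ]
  exact Int.mul_ediv_cancel _ (by omega)

-- pooling a region of the pooled table = pooling the doubled region of the original
theorem pv_shift (mat : List (List Int)) (m : Nat) :
    ∀ (j : Nat) (r c : Int), 0 ≤ r → 0 ≤ c →
      r + 2 ^ (j + 1) ≤ (m : Int) → c + 2 ^ (j + 1) ≤ (m : Int) →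
      pvPool (pvT mat m) ((2 : Int) ^ (j + 1)) r c = pvPool mat ((2 : Int) ^ (j + 2)) (2 * r) (2 * c) := by
  intro j
  induction j with
  | zero =>
    intro r c hr hc hrm hcm
    have h42 : PySem.Int.floordiv 4 2 = 2 := by decide
    have e2 : ∀ a b : Int, pvPool mat 2 a b = pvBlock mat a b := by
      intro a b; rw [pvPool]; norm_num
    have hrm' : r + 2 ≤ (m : Int) := by simpa using hrm
    have hcm' : c + 2 ≤ (m : Int) := by simpa using hcm
    have lhs : pvPool (pvT mat m) ((2 : Int) ^ (0 + 1)) r c = pvBlock (pvT mat m) r c := by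
      rw [pvPool]; norm_num
    have rhs : pvPool mat ((2 : Int) ^ (0 + 2)) (2 * r) (2 * c) =
        PySem.List.pyGetD (PySem.List.sorted
          [pvBlock mat (2 * r) (2 * c), pvBlock mat (2 * r) (2 * c + 2),
           pvBlock mat (2 * r + 2) (2 * c), pvBlock mat (2 * r + 2) (2 * c + 2)]
          (fun x => x)) 2 0 := by
      rw [pvPool]; norm_num [h42, e2]
    rw [lhs, rhs, pvBlock]
    rw [pv_cell_pvT mat m r c (by omega) (by omega) (by omega) (by omega),
        pv_cell_pvT mat m r (c + 1) (by omega) (by omega) (by omega) (by omega),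
        pv_cell_pvT mat m (r + 1) c (by omega) (by omega) (by omega) (by omega),
        pv_cell_pvT mat m (r + 1) (c + 1) (by omega) (by omega) (by omega) (by omega)]
    congr 2 <;> ring
  | succ j ih =>
    intro r c hr hc hrm hcm
    have hp : (0 : Int) < 2 ^ (j + 1) := by positivity
    rw [pvPool, pvPool]
    have hb1 : ¬ ((2 : Int) ^ (j + 1 + 1) ≤ 1) := by
      have : (2 : Int) ^ (j + 1) ≤ 2 ^ (j + 1 + 1) := by
        apply pow_le_pow_right₀ <;> omega
      omega
    have hb2 : ¬ ((2 : Int) ^ (j + 1 + 1) = 2) := by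
      have h4 : (4 : Int) ≤ 2 ^ (j + 1 + 1) := by
        calc (4 : Int) = 2 ^ 2 := by norm_num
          _ ≤ 2 ^ (j + 1 + 1) := by apply pow_le_pow_right₀ <;> omega
      omega
    have hb1' : ¬ ((2 : Int) ^ (j + 1 + 2) ≤ 1) := by
      have : (2 : Int) ^ (j + 1 + 1) ≤ 2 ^ (j + 1 + 2) := by
        apply pow_le_pow_right₀ <;> omega
      omega
    have hb2' : ¬ ((2 : Int) ^ (j + 1 + 2) = 2) := by
      have h4 : (4 : Int) ≤ 2 ^ (j + 1 + 2) := by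
        calc (4 : Int) = 2 ^ 2 := by norm_num
          _ ≤ 2 ^ (j + 1 + 2) := by apply pow_le_pow_right₀ <;> omega
      omega
    rw [dif_neg hb1, dif_neg hb2, dif_neg hb1', dif_neg hb2']
    simp only [pv_pow_floordiv]
    have hsum : (2 : Int) ^ (j + 1) + 2 ^ (j + 1) = 2 ^ (j + 1 + 1) := by ring
    rw [ih r c hr hc (by omega) (by omega),
        ih r (c + 2 ^ (j + 1)) hr (by positivity) (by omega) (by omega),
        ih (r + 2 ^ (j + 1)) c (by positivity) hc (by omega) (by omega),
        ih (r + 2 ^ (j + 1)) (c + 2 ^ (j + 1)) (by positivity) (by positivity) (by omega) (by omega)]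
    congr 2 <;> ring_nf

theorem pv_main (k : Nat) : ∀ (mat : List (List Int)),
    f ((2 : Int) ^ (k + 1)) mat = pvPool mat ((2 : Int) ^ (k + 1)) 0 0 := by
  induction k with
  | zero =>
    intro mat
    rw [f, pvPool]
    norm_num
  | succ k ih =>
    intro mat
    have hb1 : ¬ ((2 : Int) ^ (k + 1 + 1) ≤ 1) := by
      have : (2 : Int) ^ (k + 1) ≤ 2 ^ (k + 1 + 1) := by
        apply pow_le_pow_right₀ <;> omega
      have : (0 : Int) < 2 ^ (k + 1) := by positivity
      omega
    have hb2 : ¬ ((2 : Int) ^ (k + 1 + 1) = 2) := by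
      have h4 : (4 : Int) ≤ 2 ^ (k + 1 + 1) := by
        calc (4 : Int) = 2 ^ 2 := by norm_num
          _ ≤ 2 ^ (k + 1 + 1) := by apply pow_le_pow_right₀ <;> omega
      omega
    rw [f, dif_neg hb1, dif_neg hb2]
    simp only [pv_pow_floordiv]
    have h2m : (2 : Int) ^ (k + 1) = ((2 ^ (k + 1) : Nat) : Int) := by push_cast; ring
    have hloop : (2 : Int) ^ (k + 1 + 1) = 2 * ((2 ^ (k + 1) : Nat) : Int) := by push_cast; ring
    rw [show ((2 : Int) ^ (k + 1)).toNat = 2 ^ (k + 1) by omega]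
    rw [hloop, pv_loop_eq_pvT]
    rw [ih]
    have hsh := pv_shift mat (2 ^ (k + 1)) k 0 0 le_rfl le_rfl
      (by push_cast; omega) (by push_cast; omega)
    rw [show (2 : Int) ^ (k + 2) = 2 * 2 ^ (k + 1) by ring] at hsh
    simpa using hsh

-- ===== VERDICT (by name: the statement is the Claim_ definition above) =====
theorem f_spec : Claim_equal_f := by
  intro n mat _ hpre
  obtain ⟨hn2, hpow, -, -⟩ := hpre
  have hlog : 1 ≤ Nat.log2 n.toNat := by
    by_contra h
    interval_cases h' : Nat.log2 n.toNat <;> omega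
  obtain ⟨k, hk⟩ : ∃ k, Nat.log2 n.toNat = k + 1 := ⟨Nat.log2 n.toNat - 1, by omega⟩
  have hnt : n.toNat = 2 ^ (k + 1) := by rw [hpow, hk]
  have hn : n = ((2 ^ (k + 1) : Nat) : Int) := by omega
  show f n mat = f_alt n mat
  rw [hn]
  unfold f_alt
  rw [show (((2 ^ (k + 1) : Nat) : Int)) = (2 : Int) ^ (k + 1) by push_cast; ring]
  exact pv_main k mat
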